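-- pv_equiv track=rewrite | github.com/FengYaLiuYan/ShuZhiFenXi_text | tools.py | DaShu_DaShu_Int
-- ===== SOURCE A (Python) =====
-- def DaShu_DaShu_Int(x):
--     res = 0
--     for i in range(1,len(x)):
--         temp = x[len(x) - i]
--         for j in range(i - 1):
--             temp = temp * 10
--         res += temp
--     res = res * x[0]
--     return res
-- ===== SOURCE B (Python) =====
-- def DaShu_DaShu_Int(x):
--     res = 0
--     for d in x[1:]:
--         res = res * 10 + d
--     return res * x[0]
-- ===== Notes on version B (the rewrite author's own statement) =====
-- stated objective: faster
-- what changed: Replaced the reversed-index outer loop with an inner repeated-multiplication loop (quadratic number of multiplications building 10^(i-1) each time) by a single left-to-right Horner pass over x[1:] with one multiply-add per digit.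
import Mathlib
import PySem

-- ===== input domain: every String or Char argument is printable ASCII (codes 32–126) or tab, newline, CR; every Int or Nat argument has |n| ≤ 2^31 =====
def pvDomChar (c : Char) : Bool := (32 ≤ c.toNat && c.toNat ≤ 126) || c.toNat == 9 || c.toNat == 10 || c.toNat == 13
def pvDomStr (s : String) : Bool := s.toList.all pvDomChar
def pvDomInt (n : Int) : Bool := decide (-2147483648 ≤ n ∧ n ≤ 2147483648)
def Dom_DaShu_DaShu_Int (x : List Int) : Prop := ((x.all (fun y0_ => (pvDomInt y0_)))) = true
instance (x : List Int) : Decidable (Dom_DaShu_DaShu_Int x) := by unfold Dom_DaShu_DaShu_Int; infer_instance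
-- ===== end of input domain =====

-- B replaces A's quadratic repeated-multiplication loop with one Horner pass over x[1:] (one multiply-add per digit); same return value on every non-empty list.

-- ===== PORT A =====
def DaShu_DaShu_Int (x : List Int) : Int :=
  let n : Int := x.length
  let res : Int :=
    (PySem.List.pyRange 1 n 1).foldl (fun res i =>
      let temp := PySem.List.pyGetD x (n - i) 0
      let temp := (PySem.List.pyRange 0 (i - 1) 1).foldl (fun t _ => t * 10) temp
      res + temp) 0
  res * PySem.List.pyGetD x 0 0

-- ===== PORT B =====
def DaShu_DaShu_Int_alt (x : List Int) : Int :=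
  (PySem.List.slice x (some 1) none).foldl (fun res d => res * 10 + d) 0
    * PySem.List.pyGetD x 0 0

-- ===== PRECONDITION & SPEC =====
-- Both A and B raise IndexError at x[0] on the empty list; Pre_ excludes exactly that input.
def Pre_DaShu_DaShu_Int (x : List Int) : Prop := x ≠ []
instance (x : List Int) : Decidable (Pre_DaShu_DaShu_Int x) := by unfold Pre_DaShu_DaShu_Int; infer_instance
def pvWitness_DaShu_DaShu_Int : List Int := [3, 1, 2, 5]

def Spec_DaShu_DaShu_Int (x : List Int) (out : Int) : Prop := out = DaShu_DaShu_Int_alt x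
instance (x : List Int) (out : Int) : Decidable (Spec_DaShu_DaShu_Int x out) := by unfold Spec_DaShu_DaShu_Int; infer_instance

-- ===== CLAIM (what is proved, stated in full; the proofs are below) =====
def Claim_equal_DaShu_DaShu_Int : Prop := ∀ (x : List Int), Dom_DaShu_DaShu_Int x → Pre_DaShu_DaShu_Int x → Spec_DaShu_DaShu_Int x (DaShu_DaShu_Int x)

-- ===== LEMMAS AND PROOFS =====

-- A's inner loop multiplies by 10 once per iteration of the range.
lemma mul10_fold (l : List Int) (t : Int) :
    l.foldl (fun t _ => t * 10) t = t * 10 ^ l.length := by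
  induction l generalizing t with
  | nil => simp
  | cons a l ih => rw [List.foldl_cons, ih]; rw [List.length_cons, pow_succ]; ring

-- Horner fold from a nonzero accumulator.
lemma horner_shift (l : List Int) (r : Int) :
    l.foldl (fun r d => r * 10 + d) r
      = r * 10 ^ l.length + l.foldl (fun r d => r * 10 + d) 0 := by
  induction l generalizing r with
  | nil => simp
  | cons a l ih =>
    rw [List.foldl_cons, ih (r * 10 + a), List.foldl_cons, ih (0 * 10 + a),
      List.length_cons, pow_succ]
    ring

-- A's reversed-index sum of digit·power terms equals the Horner value.
lemma sumRev (l : List Int) :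
    ((List.range l.length).map (fun k => l.getD (l.length - 1 - k) 0 * 10 ^ k)).sum
      = l.foldl (fun r d => r * 10 + d) 0 := by
  induction l with
  | nil => simp
  | cons d t ih =>
    rw [List.length_cons, List.range_succ, List.map_append, List.sum_append]
    have h1 : ∀ k ∈ List.range t.length,
        (d :: t).getD (t.length + 1 - 1 - k) 0 * 10 ^ k
          = t.getD (t.length - 1 - k) 0 * 10 ^ k := by
      intro k hk
      rw [List.mem_range] at hk
      have h2 : t.length + 1 - 1 - k = (t.length - 1 - k) + 1 := by omega
      rw [h2, List.getD_cons_succ]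
    rw [List.map_congr_left h1, ih, List.foldl_cons, horner_shift t (0 * 10 + d)]
    simp
    ring

-- A's outer loop computes the Horner value of the tail.
lemma outer_loop_eq (x0 : Int) (l : List Int) :
    (PySem.List.pyRange 1 ((x0 :: l).length : Int) 1).foldl (fun res i =>
        res + (PySem.List.pyRange 0 (i - 1) 1).foldl (fun t _ => t * 10)
          (PySem.List.pyGetD (x0 :: l) (((x0 :: l).length : Int) - i) 0)) 0
      = l.foldl (fun r d => r * 10 + d) 0 := by
  simp only [mul10_fold, PySem.List.length_pyRange_one, sub_zero]
  rw [PySem.List.pyRange_one, List.foldl_map,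
    PySem.List.foldl_add (List.range ((((x0 :: l).length : Int)) - 1).toNat)
      (fun k => PySem.List.pyGetD (x0 :: l) (((x0 :: l).length : Int) - (1 + (k : Int))) 0
        * 10 ^ ((1 + (k : Int)) - 1).toNat), zero_add]
  have hlen : ((((x0 :: l).length : Int)) - 1).toNat = l.length := by
    simp [List.length_cons]
  rw [hlen]
  have h1 : ∀ k ∈ List.range l.length,
      PySem.List.pyGetD (x0 :: l) (((x0 :: l).length : Int) - (1 + (k : Int))) 0
          * 10 ^ ((1 + (k : Int)) - 1).toNat
        = l.getD (l.length - 1 - k) 0 * 10 ^ k := by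
    intro k hk
    rw [List.mem_range] at hk
    have hidx : ((x0 :: l).length : Int) - (1 + (k : Int)) = ((l.length - k : Nat) : Int) := by
      simp [List.length_cons]; omega
    have hpow : ((1 + (k : Int)) - 1).toNat = k := by omega
    rw [hidx, hpow, PySem.List.pyGetD_natCast]
    have h2 : l.length - k = (l.length - 1 - k) + 1 := by omega
    rw [h2, List.getD_cons_succ]
  rw [List.map_congr_left h1, sumRev]

-- ===== VERDICT (by name: the statement is the Claim_ definition above) =====
theorem DaShu_DaShu_Int_spec : Claim_equal_DaShu_DaShu_Int := by
  intro x _ hpre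
  unfold Spec_DaShu_DaShu_Int DaShu_DaShu_Int DaShu_DaShu_Int_alt
  cases x with
  | nil => exact absurd rfl hpre
  | cons x0 l =>
    rw [PySem.List.slice_from_one, List.tail_cons, PySem.List.pyGetD_zero_cons]
    simp only
    rw [outer_loop_eq x0 l]
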